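-- pv_equiv track=rewrite | github.com/joyful-young/OnlineJudge | 프로그래머스/2/42626. 더 맵게/더 맵게.py | solution
-- ===== SOURCE A (Python) =====
-- from heapq import heapify, heappush, heappop
--
-- def solution(scoville, K):
--     heapify(scoville)
--
--     answer = 0
--     while len(scoville) > 1:
--         first = heappop(scoville)
--         if first >= K:
--             return answer
--
--         second = heappop(scoville)
--         heappush(scoville, first + second * 2)
--         answer += 1
--
--     if scoville[0] >= K:
--         return answer
--
--     return -1
-- ===== SOURCE B (Python) =====
-- def solution(scoville, K):
--     # Heap-free re-implementation: repeated linear min-scans on a plain list.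
--     # (A mutates its argument via heapify/heappop; B leaves it untouched --
--     # only the return value is claimed equal.)
--     pool = list(scoville)
--     answer = 0
--     while len(pool) > 1:
--         first = min(pool)
--         pool.remove(first)
--         if first >= K:
--             return answer
--         second = min(pool)
--         pool.remove(second)
--         pool.append(first + second * 2)
--         answer += 1
--     if pool[0] >= K:
--         return answer
--     return -1
-- ===== Notes on version B (the rewrite author's own statement) =====
-- stated objective: simpler
-- what changed: Replaced the binary heap (heapify/heappop/heappush) by a plain list with repeated linear min-scan and remove, and B no longer mutates the caller's list.
import Mathlib
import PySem

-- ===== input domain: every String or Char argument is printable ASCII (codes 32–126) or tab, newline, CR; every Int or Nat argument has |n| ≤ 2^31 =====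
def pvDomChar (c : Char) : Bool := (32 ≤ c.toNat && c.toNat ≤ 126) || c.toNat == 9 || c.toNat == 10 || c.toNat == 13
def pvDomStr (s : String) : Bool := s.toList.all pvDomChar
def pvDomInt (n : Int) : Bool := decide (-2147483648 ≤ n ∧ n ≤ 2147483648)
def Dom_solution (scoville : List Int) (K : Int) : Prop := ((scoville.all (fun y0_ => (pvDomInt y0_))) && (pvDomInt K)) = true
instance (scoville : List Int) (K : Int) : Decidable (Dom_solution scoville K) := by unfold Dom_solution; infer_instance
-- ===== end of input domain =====

-- B replaces A's binary heap by repeated linear min-scans on a plain list (a different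
-- algorithm of the same result); A mutates its argument in place (heapify/pops/pushes),
-- B does not: the equivalence proved here is about the RETURN value only.

-- ===== PORT A =====
-- termination measures cited by the ports' recursions
theorem sdl_dec (s p : Nat) (h : s < p) : (p - 1) / 2 < p := by omega
theorem sul_dec1 (e p : Nat) (h : 2 * p + 1 < e) : e - (2 * p + 1) < e - p := by omega
theorem sul_dec2 (e p : Nat) (h : 2 * p + 1 < e) : e - (2 * p + 2) < e - p := by omega
theorem sul_pred (n e p : Nat) (h : 2 * p + 1 < e) (hb : e - p ≤ n) : n - 1 < n := by omega
theorem sul_le1' (e p n : Nat) (h : 2 * p + 1 < e) (hb : e - p ≤ n) : e - (2 * p + 1) ≤ n - 1 := by omega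
theorem sul_le2' (e p n : Nat) (h : 2 * p + 1 < e) (hb : e - p ≤ n) : e - (2 * p + 2) ≤ n - 1 := by omega

-- CPython heapq._siftdown: bubble newitem towards the root, moving parents down.
def siftdownLoopA (heap : List Int) (startpos pos : Nat) (newitem : Int) : List Int × Nat :=
  if _h : startpos < pos then
    let parent := (pos - 1) / 2
    if newitem < heap.getD parent 0 then
      siftdownLoopA (heap.set pos (heap.getD parent 0)) startpos parent newitem
    else (heap, pos)
  else (heap, pos)
termination_by pos
decreasing_by exact sdl_dec _ _ _h

-- heap[pos] = newitem after the while-loop (indices are in range at every call site,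
-- so list indexing is ported via getD; Python would raise only out of range).
def siftdownA (heap : List Int) (startpos pos : Nat) : List Int :=
  let newitem := heap.getD pos 0
  let r := siftdownLoopA heap startpos pos newitem
  r.1.set r.2 newitem

-- CPython heapq._siftup while-loop: move the smaller child up until reaching a leaf.
def siftupLoopA (heap : List Int) (endpos pos : Nat) : List Int × Nat :=
  if _h : 2 * pos + 1 < endpos then
    if 2 * pos + 2 < endpos ∧ ¬ (heap.getD (2 * pos + 1) 0 < heap.getD (2 * pos + 2) 0) then
      siftupLoopA (heap.set pos (heap.getD (2 * pos + 2) 0)) endpos (2 * pos + 2)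
    else
      siftupLoopA (heap.set pos (heap.getD (2 * pos + 1) 0)) endpos (2 * pos + 1)
  else (heap, pos)
termination_by endpos - pos
decreasing_by all_goals first | exact sul_dec2 _ _ _h | exact sul_dec1 _ _ _h

def siftupA (heap : List Int) (pos : Nat) : List Int :=
  let newitem := heap.getD pos 0
  let r := siftupLoopA heap heap.length pos
  siftdownA (r.1.set r.2 newitem) pos r.2

-- heapify: for i in reversed(range(n//2)): _siftup(heap, i)
def heapifyA (heap : List Int) : List Int :=
  (List.range (heap.length / 2)).reverse.foldl (fun h i => siftupA h i) heap

-- heappop (call sites guarantee a nonempty heap; Python raises IndexError on [])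
def heappopA (heap : List Int) : Int × List Int :=
  let lastelt := heap.getLast?.getD 0
  let rest := heap.dropLast
  if rest.isEmpty then (lastelt, rest)
  else
    let returnitem := rest.getD 0 0
    (returnitem, siftupA (rest.set 0 lastelt) 0)

def heappushA (heap : List Int) (item : Int) : List Int :=
  siftdownA (heap ++ [item]) 0 heap.length

-- length facts cited by loopA's termination proof
theorem siftdownLoopA_length_aux : ∀ (p : Nat) (heap : List Int) (s : Nat) (x : Int),
    (siftdownLoopA heap s p x).1.length = heap.length := by
  intro p
  induction p using Nat.strong_induction_on with
  | _ p ih =>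
    intro heap s x
    rw [siftdownLoopA]
    split
    · next h1 =>
      show (if x < heap.getD ((p - 1) / 2) 0 then
            siftdownLoopA (heap.set p (heap.getD ((p - 1) / 2) 0)) s ((p - 1) / 2) x
          else (heap, p)).1.length = heap.length
      split
      · rw [ih ((p - 1) / 2) (sdl_dec s p h1)]
        exact List.length_set
      · rfl
    · rfl

theorem siftdownLoopA_length (heap : List Int) (s p : Nat) (x : Int) :
    (siftdownLoopA heap s p x).1.length = heap.length :=
  siftdownLoopA_length_aux p heap s x

theorem siftupLoopA_length_aux : ∀ (n : Nat) (heap : List Int) (e p : Nat), e - p ≤ n →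
    (siftupLoopA heap e p).1.length = heap.length := by
  intro n
  induction n using Nat.strong_induction_on with
  | _ n ih =>
    intro heap e p hb
    rw [siftupLoopA]
    split
    · next h =>
      split
      · rw [ih (n - 1) (sul_pred n e p h hb) _ _ _ (sul_le2' e p n h hb)]
        exact List.length_set
      · rw [ih (n - 1) (sul_pred n e p h hb) _ _ _ (sul_le1' e p n h hb)]
        exact List.length_set
    · rfl

theorem siftupLoopA_length (heap : List Int) (e p : Nat) :
    (siftupLoopA heap e p).1.length = heap.length :=
  siftupLoopA_length_aux (e - p) heap e p le_rfl

theorem siftdownA_length (heap : List Int) (s p : Nat) :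
    (siftdownA heap s p).length = heap.length := by
  simp [siftdownA, siftdownLoopA_length]

theorem siftupA_length (heap : List Int) (p : Nat) :
    (siftupA heap p).length = heap.length := by
  simp [siftupA, siftdownA_length, siftupLoopA_length]

theorem heappopA_length (heap : List Int) (h : heap ≠ []) :
    (heappopA heap).2.length + 1 = heap.length := by
  unfold heappopA
  by_cases he : heap.dropLast.isEmpty <;>
    simp [he, siftupA_length, List.length_dropLast] <;>
    cases heap <;> simp_all [List.isEmpty_iff, List.length_dropLast] <;> omega

theorem heappushA_length (heap : List Int) (x : Int) :
    (heappushA heap x).length = heap.length + 1 := by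
  simp [heappushA, siftdownA_length]

-- the main while-loop of solution
theorem loopA_dec (heap : List Int) (x : Int) (h : 1 < heap.length) :
    (heappushA (heappopA (heappopA heap).2).2 x).length < heap.length := by
  have h1 : (heappopA heap).2.length + 1 = heap.length :=
    heappopA_length heap (by intro he; simp [he] at h)
  have h2 : (heappopA (heappopA heap).2).2.length + 1 = (heappopA heap).2.length :=
    heappopA_length _ (by intro he; rw [he] at h1; simp at h1; omega)
  rw [heappushA_length]; omega

def loopA (heap : List Int) (K : Int) (answer : Int) : Int :=
  if _h : 1 < heap.length then
    let p1 := heappopA heap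
    if p1.1 ≥ K then answer
    else
      let p2 := heappopA p1.2
      loopA (heappushA p2.2 (p1.1 + p2.1 * 2)) K (answer + 1)
  else
    if heap.getD 0 0 ≥ K then answer else -1
termination_by heap.length
decreasing_by exact loopA_dec heap _ _h

def solution (scoville : List Int) (K : Int) : Int :=
  loopA (heapifyA scoville) K 0

-- ===== PORT B =====
-- helper fact cited by loopB's termination proof: removing min(pool) shrinks pool by one
theorem minRemove_length (xs : List Int) (hx : xs ≠ []) :
    ((PySem.List.remove? xs ((PySem.List.min? xs (fun x => x)).getD 0)).getD []).length + 1
      = xs.length := by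
  obtain ⟨m, hm⟩ : ∃ m, PySem.List.min? xs (fun x => x) = some m := by
    cases h : PySem.List.min? xs (fun x => x) with
    | none => exact absurd ((PySem.List.min?_eq_none_iff xs _).mp h) hx
    | some m => exact ⟨m, rfl⟩
  have hmem : m ∈ xs := PySem.List.min?_mem hm
  rw [hm, Option.getD_some, PySem.List.remove?_eq_some_erase xs m hmem, Option.getD_some,
      List.length_erase_of_mem hmem]
  have : 0 < xs.length := List.length_pos_iff.mpr hx
  omega

theorem loopB_dec (pool : List Int) (v : Int) (h : 1 < pool.length) :
    (((PySem.List.remove?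
        ((PySem.List.remove? pool ((PySem.List.min? pool (fun x => x)).getD 0)).getD [])
        ((PySem.List.min?
            ((PySem.List.remove? pool ((PySem.List.min? pool (fun x => x)).getD 0)).getD [])
            (fun x => x)).getD 0)).getD []) ++ [v]).length < pool.length := by
  have h1 := minRemove_length pool (by intro he; simp [he] at h)
  have h2 := minRemove_length ((PySem.List.remove? pool
      ((PySem.List.min? pool (fun x => x)).getD 0)).getD [])
    (by intro he; rw [he] at h1; simp at h1; omega)
  simp only [List.length_append, List.length_cons, List.length_nil]
  omega

def loopB (pool : List Int) (K : Int) (answer : Int) : Int :=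
  if _h : 1 < pool.length then
    let first := (PySem.List.min? pool (fun x => x)).getD 0
    let pool1 := (PySem.List.remove? pool first).getD []
    if first ≥ K then answer
    else
      let second := (PySem.List.min? pool1 (fun x => x)).getD 0
      let pool2 := (PySem.List.remove? pool1 second).getD []
      loopB (pool2 ++ [first + second * 2]) K (answer + 1)
  else
    if pool.getD 0 0 ≥ K then answer else -1
termination_by pool.length
decreasing_by exact loopB_dec pool _ _h

def solution_alt (scoville : List Int) (K : Int) : Int :=
  loopB scoville K 0

-- ===== PRECONDITION & SPEC =====
-- Pre_ excludes only the empty list, on which A (scoville[0]) raises IndexError.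
def Pre_solution (scoville : List Int) (K : Int) : Prop := scoville ≠ []
instance (scoville : List Int) (K : Int) : Decidable (Pre_solution scoville K) := by
  unfold Pre_solution; infer_instance

def pvWitness_solution : List Int × Int := ([1, 2, 3, 9, 10, 12], 7)

def Spec_solution (scoville : List Int) (K : Int) (out : Int) : Prop := out = solution_alt scoville K
instance (scoville : List Int) (K : Int) (out : Int) : Decidable (Spec_solution scoville K out) := by
  unfold Spec_solution; infer_instance

-- ===== CLAIM (what is proved, stated in full; the proofs are below) =====
def Claim_equal_solution : Prop := ∀ (scoville : List Int) (K : Int), Dom_solution scoville K → Pre_solution scoville K → Spec_solution scoville K (solution scoville K)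

-- ===== LEMMAS AND PROOFS =====
-- basic getD/set helpers
theorem gset_eq (l : List Int) (i : Nat) (v : Int) (h : i < l.length) :
    (l.set i v).getD i 0 = v := by
  simp [List.getD_eq_getElem?_getD, List.getElem?_set_self h]

theorem gset_ne (l : List Int) {i j : Nat} (v : Int) (h : i ≠ j) :
    (l.set i v).getD j 0 = l.getD j 0 := by
  simp [List.getD_eq_getElem?_getD, List.getElem?_set_ne h]

theorem set_getD_self (l : List Int) (i : Nat) : l.set i (l.getD i 0) = l := by
  by_cases h : i < l.length
  · rw [List.getD_eq_getElem l 0 h]; exact List.set_getElem_self h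
  · exact List.set_eq_of_length_le (by omega)

-- swapping two positions is a permutation
theorem cons_set_perm (t : List Int) (j : Nat) (a : Int) (h : j < t.length) :
    (t.getD j 0 :: t.set j a).Perm (a :: t) := by
  induction t generalizing j with
  | nil => simp at h
  | cons b u ihu =>
    cases j with
    | zero => simpa using List.Perm.swap a b u
    | succ j' =>
      have hj : j' < u.length := by simpa using h
      exact (List.Perm.swap _ _ _).trans (((ihu j' hj).cons b).trans (List.Perm.swap _ _ _))

theorem swap_perm (l : List Int) : ∀ (i j : Nat), i < l.length → j < l.length →
    ((l.set i (l.getD j 0)).set j (l.getD i 0)).Perm l := by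
  induction l with
  | nil => intro i j hi; simp at hi
  | cons a t iht =>
    intro i j hi hj
    match i, j with
    | 0, 0 => simp [set_getD_self]
    | 0, j'+1 =>
      have hj' : j' < t.length := by simpa using hj
      have : ((a :: t).set 0 (t.getD j' 0)).set (j'+1) a = t.getD j' 0 :: t.set j' a := by
        simp
      rw [show ((a :: t).getD (j'+1) 0) = t.getD j' 0 from rfl,
          show ((a :: t).getD 0 0) = a from rfl, this]
      exact cons_set_perm t j' a hj'
    | i'+1, 0 =>
      have hi' : i' < t.length := by simpa using hi
      have : ((a :: t).set (i'+1) a).set 0 (t.getD i' 0) = t.getD i' 0 :: t.set i' a := by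
        simp
      rw [show ((a :: t).getD 0 0) = a from rfl,
          show ((a :: t).getD (i'+1) 0) = t.getD i' 0 from rfl, this]
      exact cons_set_perm t i' a hi'
    | i'+1, j'+1 =>
      have hi' : i' < t.length := by simpa using hi
      have hj' : j' < t.length := by simpa using hj
      simpa using (iht i' j' hi' hj').cons a
-- "k lies in the subtree rooted at s" (following parent links (k-1)/2)
def InTree (s k : Nat) : Prop :=
  if s = k then True
  else if k ≤ s then False
  else InTree s ((k - 1) / 2)
termination_by k
decreasing_by omega

theorem InTree_self (s : Nat) : InTree s s := by rw [InTree.eq_def]; simp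

theorem InTree_le {s k : Nat} (h : InTree s k) : s ≤ k := by
  rw [InTree.eq_def] at h
  by_cases h1 : s = k
  · omega
  · by_cases h2 : k ≤ s
    · simp [h1, h2] at h
    · omega

theorem InTree_parent {s k : Nat} (h : InTree s k) (hne : s ≠ k) : InTree s ((k - 1) / 2) := by
  rw [InTree.eq_def] at h
  by_cases h2 : k ≤ s
  · have := InTree_le (by rw [InTree.eq_def]; exact h)
    omega
  · simpa [hne, h2] using h

theorem InTree_zero (k : Nat) : InTree 0 k := by
  induction k using Nat.strong_induction_on with
  | _ k ih =>
    rw [InTree.eq_def]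
    by_cases h1 : 0 = k
    · simp [h1]
    · simp only [h1, if_false]
      have : ¬ k ≤ 0 := by omega
      simp only [this, if_false]
      exact ih ((k - 1) / 2) (by omega)

theorem InTree_child1 {s k : Nat} (h : InTree s k) : InTree s (2 * k + 1) := by
  have hle := InTree_le h
  rw [InTree.eq_def]
  by_cases h1 : s = 2 * k + 1
  · simp [h1]
  · have h2 : ¬ 2 * k + 1 ≤ s := by omega
    have h3 : (2 * k + 1 - 1) / 2 = k := by omega
    simp only [h1, if_false, h2, h3]
    exact h

theorem InTree_child2 {s k : Nat} (h : InTree s k) : InTree s (2 * k + 2) := by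
  have hle := InTree_le h
  rw [InTree.eq_def]
  by_cases h1 : s = 2 * k + 2
  · simp [h1]
  · have h2 : ¬ 2 * k + 2 ≤ s := by omega
    have h3 : (2 * k + 2 - 1) / 2 = k := by omega
    simp only [h1, if_false, h2, h3]
    exact h
-- siftdownLoopA: bubbling newitem up preserves the heap edges above s and permutes
theorem siftdownLoopA_spec (heap : List Int) (s pos : Nat) (x : Int) :
    pos < heap.length → InTree s pos →
    (∀ k, 0 < k → k < heap.length → s ≤ (k - 1) / 2 → k ≠ pos →
        (heap.set pos x).getD ((k - 1) / 2) 0 ≤ (heap.set pos x).getD k 0) →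
    (s < pos → ∀ c, (c = 2 * pos + 1 ∨ c = 2 * pos + 2) → c < heap.length →
        (heap.set pos x).getD ((pos - 1) / 2) 0 ≤ (heap.set pos x).getD c 0) →
    (∀ k, 0 < k → k < heap.length → s ≤ (k - 1) / 2 →
        ((siftdownLoopA heap s pos x).1.set (siftdownLoopA heap s pos x).2 x).getD ((k - 1) / 2) 0
          ≤ ((siftdownLoopA heap s pos x).1.set (siftdownLoopA heap s pos x).2 x).getD k 0)
    ∧ ((siftdownLoopA heap s pos x).1.set (siftdownLoopA heap s pos x).2 x).Perm (heap.set pos x) := by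
  fun_induction siftdownLoopA heap s pos x with
  | case1 heap pos hlt parent hx ih =>
    intro hp ht ha hc
    have hpar : parent = (pos - 1) / 2 := rfl
    have hpos1 : 1 ≤ pos := by omega
    have hplt : parent < pos := by omega
    have hplen : parent < heap.length := by omega
    have hpne : pos ≠ parent := by omega
    have hsne : s ≠ pos := by omega
    have hgpar : (heap.set pos x).getD parent 0 = heap.getD parent 0 := gset_ne _ _ hpne
    have hgpos : (heap.set pos x).getD pos 0 = x := gset_eq _ _ _ hp
    -- abbreviations for the new state
    set c := heap.getD parent 0 with hcdef
    set heap' := heap.set pos c with hdef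
    have hlen' : heap'.length = heap.length := by simp [hdef]
    -- pointwise values of heap'.set parent x
    have hg'par : (heap'.set parent x).getD parent 0 = x := gset_eq _ _ _ (by omega)
    have hg'pos : (heap'.set parent x).getD pos 0 = c := by
      rw [gset_ne _ _ (by omega : parent ≠ pos), hdef, gset_eq _ _ _ hp]
    have hg'other : ∀ j, j ≠ pos → j ≠ parent → (heap'.set parent x).getD j 0 = heap.getD j 0 := by
      intro j h1 h2
      rw [gset_ne _ _ (Ne.symm h2), hdef, gset_ne _ _ (Ne.symm h1)]
    have hgother : ∀ j, j ≠ pos → (heap.set pos x).getD j 0 = heap.getD j 0 := by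
      intro j h1; exact gset_ne _ _ (Ne.symm h1)
    -- hypotheses of the induction hypothesis
    have ht' : InTree s parent := by rw [hpar]; exact InTree_parent ht hsne
    have ha' : ∀ k, 0 < k → k < heap'.length → s ≤ (k - 1) / 2 → k ≠ parent →
        (heap'.set parent x).getD ((k - 1) / 2) 0 ≤ (heap'.set parent x).getD k 0 := by
      intro k hk0 hklen hks hkp
      rw [hlen'] at hklen
      by_cases hkpos : k = pos
      · subst hkpos; rw [← hpar, hg'par, hg'pos]; exact le_of_lt hx
      · by_cases hkc : (k - 1) / 2 = pos
        · have hch : k = 2 * pos + 1 ∨ k = 2 * pos + 2 := by omega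
          rw [hkc, hg'pos, hg'other k hkpos hkp]
          have := hc (by omega) k hch hklen
          rw [← hpar, hgpar, hgother k hkpos] at this
          exact this
        · by_cases hkc2 : (k - 1) / 2 = parent
          · rw [hkc2, hg'par, hg'other k hkpos hkp]
            have := ha k hk0 hklen hks hkpos
            rw [hkc2, hgpar, hgother k hkpos] at this
            exact le_of_lt (lt_of_lt_of_le hx this)
          · rw [hg'other _ hkc hkc2, hg'other k hkpos hkp]
            have := ha k hk0 hklen hks hkpos
            rw [hgother _ hkc, hgother k hkpos] at this
            exact this
    have hc' : s < parent → ∀ c2, (c2 = 2 * parent + 1 ∨ c2 = 2 * parent + 2) →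
        c2 < heap'.length →
        (heap'.set parent x).getD ((parent - 1) / 2 : Nat) 0 ≤ (heap'.set parent x).getD c2 0 := by
      intro hsp c2 hch hc2len
      rw [hlen'] at hc2len
      have hpar1 : 1 ≤ parent := by omega
      have hppne : (parent - 1) / 2 ≠ pos := by omega
      have hppne2 : (parent - 1) / 2 ≠ parent := by omega
      have hspp : s ≤ (parent - 1) / 2 :=
        InTree_le (InTree_parent ht' (by omega : s ≠ parent))
      have hbase : heap.getD ((parent - 1) / 2) 0 ≤ heap.getD parent 0 := by
        have := ha parent (by omega) (by omega) hspp hpne.symm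
        rwa [hgother _ hppne, hgother parent hpne.symm] at this
      rw [hg'other _ hppne hppne2]
      by_cases hc2pos : c2 = pos
      · subst hc2pos; rw [hg'pos]; exact hbase
      · have hc2par : c2 ≠ parent := by omega
        rw [hg'other c2 hc2pos hc2par]
        have hc2p : (c2 - 1) / 2 = parent := by omega
        have := ha c2 (by omega) hc2len (by omega) hc2pos
        rw [hc2p, hgpar, hgother c2 hc2pos] at this
        exact le_trans hbase this
    obtain ⟨ihA, ihP⟩ := ih (by omega) ht' ha' hc'
    constructor
    · intro k hk0 hklen hks
      exact ihA k hk0 (by omega) hks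
    · refine ihP.trans ?_
      have hset : heap'.set parent x
          = ((heap.set pos x).set pos ((heap.set pos x).getD parent 0)).set parent
              ((heap.set pos x).getD pos 0) := by
        rw [hgpar, hgpos, List.set_set, hdef, hcdef]
      rw [hset]
      exact swap_perm (heap.set pos x) pos parent (by simpa using hp) (by simpa using hplen)
  | case2 heap pos hlt parent hx =>
    intro hp ht ha _hc
    have hpar : parent = (pos - 1) / 2 := rfl
    refine ⟨?_, List.Perm.refl _⟩
    intro k hk0 hklen hks
    by_cases hkpos : k = pos
    · subst hkpos
      have hpne : k ≠ parent := by omega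
      rw [← hpar, gset_ne _ _ (by omega : k ≠ parent), gset_eq _ _ _ hp]
      exact not_lt.mp hx
    · exact ha k hk0 hklen hks hkpos
  | case3 heap pos hnlt =>
    intro hp ht ha _hc
    refine ⟨?_, List.Perm.refl _⟩
    intro k hk0 hklen hks
    by_cases hkpos : k = pos
    · have hpos : pos = s := by have := InTree_le ht; omega
      omega
    · exact ha k hk0 hklen hks hkpos
theorem siftdownA_spec (heap : List Int) (s pos : Nat)
    (hp : pos < heap.length) (ht : InTree s pos)
    (ha : ∀ k, 0 < k → k < heap.length → s ≤ (k - 1) / 2 → k ≠ pos →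
        heap.getD ((k - 1) / 2) 0 ≤ heap.getD k 0)
    (hc : ¬ 2 * pos + 1 < heap.length) :
    (∀ k, 0 < k → k < heap.length → s ≤ (k - 1) / 2 →
        (siftdownA heap s pos).getD ((k - 1) / 2) 0 ≤ (siftdownA heap s pos).getD k 0)
    ∧ (siftdownA heap s pos).Perm heap := by
  have hset : heap.set pos (heap.getD pos 0) = heap := set_getD_self heap pos
  have hmain := siftdownLoopA_spec heap s pos (heap.getD pos 0) hp ht
    (by rw [hset]; exact ha)
    (by intro _ c hch hclen; exact absurd hclen (by omega))
  rw [hset] at hmain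
  simpa [siftdownA] using hmain

theorem siftupLoopA_spec (heap : List Int) (e pos s : Nat) :
    e = heap.length → pos < heap.length → InTree s pos →
    (∀ k, 0 < k → k < heap.length → s ≤ (k - 1) / 2 → k ≠ pos → (k - 1) / 2 ≠ pos →
        heap.getD ((k - 1) / 2) 0 ≤ heap.getD k 0) →
    (s < pos → ∀ c, (c = 2 * pos + 1 ∨ c = 2 * pos + 2) → c < heap.length →
        heap.getD ((pos - 1) / 2) 0 ≤ heap.getD c 0) →
    (siftupLoopA heap e pos).2 < heap.length
    ∧ ¬ (2 * (siftupLoopA heap e pos).2 + 1 < heap.length)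
    ∧ InTree s (siftupLoopA heap e pos).2
    ∧ (∀ x : Int,
        ((siftupLoopA heap e pos).1.set (siftupLoopA heap e pos).2 x).Perm (heap.set pos x))
    ∧ (∀ k, 0 < k → k < heap.length → s ≤ (k - 1) / 2 → k ≠ (siftupLoopA heap e pos).2 →
        (k - 1) / 2 ≠ (siftupLoopA heap e pos).2 →
        (siftupLoopA heap e pos).1.getD ((k - 1) / 2) 0 ≤ (siftupLoopA heap e pos).1.getD k 0) := by
  fun_induction siftupLoopA heap e pos with
  | case1 heap pos hcl h2 ih =>
    intro he hp ht ha hb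
    have hsp : s ≤ pos := InTree_le ht
    have hcp : 2 * pos + 2 < heap.length := by omega
    set v := heap.getD (2 * pos + 2) 0 with hv
    set heap' := heap.set pos v with hdef
    have hlen' : heap'.length = heap.length := by simp [hdef]
    have hval : ∀ j, j ≠ pos → heap'.getD j 0 = heap.getD j 0 := by
      intro j hj; exact gset_ne _ _ (Ne.symm hj)
    have hvpos : heap'.getD pos 0 = v := gset_eq _ _ _ hp
    have hle21 : heap.getD (2 * pos + 2) 0 ≤ heap.getD (2 * pos + 1) 0 := not_lt.mp h2.2
    have ha' : ∀ k, 0 < k → k < heap'.length → s ≤ (k - 1) / 2 → k ≠ 2 * pos + 2 →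
        (k - 1) / 2 ≠ 2 * pos + 2 → heap'.getD ((k - 1) / 2) 0 ≤ heap'.getD k 0 := by
      intro k hk0 hklen hks hk1 hk2
      rw [hlen'] at hklen
      by_cases hkpos : k = pos
      · rw [hkpos]
        have hkp2 : (pos - 1) / 2 ≠ pos := by omega
        rw [hval _ hkp2, hvpos]
        exact hb (by omega) (2 * pos + 2) (by omega) hcp
      · by_cases hkpar : (k - 1) / 2 = pos
        · have hk21 : k = 2 * pos + 1 := by omega
          rw [hkpar, hvpos, hval k hkpos, hk21]
          exact hle21
        · rw [hval _ hkpar, hval k hkpos]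
          exact ha k hk0 hklen hks hkpos hkpar
    have hb' : s < 2 * pos + 2 → ∀ c, (c = 2 * (2 * pos + 2) + 1 ∨ c = 2 * (2 * pos + 2) + 2) →
        c < heap'.length → heap'.getD ((2 * pos + 2 - 1) / 2) 0 ≤ heap'.getD c 0 := by
      intro _ c hch hclen
      rw [hlen'] at hclen
      have hpp : (2 * pos + 2 - 1) / 2 = pos := by omega
      have hcne : c ≠ pos := by omega
      rw [hpp, hvpos, hval c hcne]
      have h3 : (c - 1) / 2 = 2 * pos + 2 := by omega
      have := ha c (by omega) hclen (by omega) hcne (by omega)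
      rw [h3, ← hv] at this
      exact this
    obtain ⟨ih1, ih2, ih3, ih4, ih5⟩ := ih (by rw [hlen']; exact he) (by rw [hlen']; omega)
      (InTree_child2 ht) ha' hb'
    refine ⟨by omega, by omega, ih3, ?_, ?_⟩
    · intro x
      refine (ih4 x).trans ?_
      have hgpar : (heap.set pos x).getD (2 * pos + 2) 0 = v := by
        rw [gset_ne _ _ (by omega : pos ≠ 2 * pos + 2), hv]
      have hgpos : (heap.set pos x).getD pos 0 = x := gset_eq _ _ _ hp
      have hset : heap'.set (2 * pos + 2) x
          = ((heap.set pos x).set pos ((heap.set pos x).getD (2 * pos + 2) 0)).set (2 * pos + 2)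
              ((heap.set pos x).getD pos 0) := by
        rw [hgpar, hgpos, List.set_set, hdef]
      rw [hset]
      exact swap_perm (heap.set pos x) pos (2 * pos + 2) (by simpa using hp) (by simpa using hcp)
    · intro k hk0 hklen hks hk1 hk2
      exact ih5 k hk0 (by omega) hks hk1 hk2
  | case2 heap pos hcl h2 ih =>
    intro he hp ht ha hb
    have hsp : s ≤ pos := InTree_le ht
    have hcp : 2 * pos + 1 < heap.length := by omega
    set v := heap.getD (2 * pos + 1) 0 with hv
    set heap' := heap.set pos v with hdef
    have hlen' : heap'.length = heap.length := by simp [hdef]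
    have hval : ∀ j, j ≠ pos → heap'.getD j 0 = heap.getD j 0 := by
      intro j hj; exact gset_ne _ _ (Ne.symm hj)
    have hvpos : heap'.getD pos 0 = v := gset_eq _ _ _ hp
    have ha' : ∀ k, 0 < k → k < heap'.length → s ≤ (k - 1) / 2 → k ≠ 2 * pos + 1 →
        (k - 1) / 2 ≠ 2 * pos + 1 → heap'.getD ((k - 1) / 2) 0 ≤ heap'.getD k 0 := by
      intro k hk0 hklen hks hk1 hk2
      rw [hlen'] at hklen
      by_cases hkpos : k = pos
      · rw [hkpos]
        have hkp2 : (pos - 1) / 2 ≠ pos := by omega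
        rw [hval _ hkp2, hvpos]
        exact hb (by omega) (2 * pos + 1) (by omega) hcp
      · by_cases hkpar : (k - 1) / 2 = pos
        · have hk22 : k = 2 * pos + 2 := by omega
          have hlt : v < heap.getD (2 * pos + 2) 0 := not_not.mp ((not_and.mp h2) (by omega))
          rw [hkpar, hvpos, hval k hkpos, hk22]
          exact le_of_lt hlt
        · rw [hval _ hkpar, hval k hkpos]
          exact ha k hk0 hklen hks hkpos hkpar
    have hb' : s < 2 * pos + 1 → ∀ c, (c = 2 * (2 * pos + 1) + 1 ∨ c = 2 * (2 * pos + 1) + 2) →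
        c < heap'.length → heap'.getD ((2 * pos + 1 - 1) / 2) 0 ≤ heap'.getD c 0 := by
      intro _ c hch hclen
      rw [hlen'] at hclen
      have hpp : (2 * pos + 1 - 1) / 2 = pos := by omega
      have hcne : c ≠ pos := by omega
      rw [hpp, hvpos, hval c hcne]
      have h3 : (c - 1) / 2 = 2 * pos + 1 := by omega
      have := ha c (by omega) hclen (by omega) hcne (by omega)
      rw [h3, ← hv] at this
      exact this
    obtain ⟨ih1, ih2, ih3, ih4, ih5⟩ := ih (by rw [hlen']; exact he) (by rw [hlen']; omega)
      (InTree_child1 ht) ha' hb'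
    refine ⟨by omega, by omega, ih3, ?_, ?_⟩
    · intro x
      refine (ih4 x).trans ?_
      have hgpar : (heap.set pos x).getD (2 * pos + 1) 0 = v := by
        rw [gset_ne _ _ (by omega : pos ≠ 2 * pos + 1), hv]
      have hgpos : (heap.set pos x).getD pos 0 = x := gset_eq _ _ _ hp
      have hset : heap'.set (2 * pos + 1) x
          = ((heap.set pos x).set pos ((heap.set pos x).getD (2 * pos + 1) 0)).set (2 * pos + 1)
              ((heap.set pos x).getD pos 0) := by
        rw [hgpar, hgpos, List.set_set, hdef]
      rw [hset]
      exact swap_perm (heap.set pos x) pos (2 * pos + 1) (by simpa using hp) (by simpa using hcp)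
    · intro k hk0 hklen hks hk1 hk2
      exact ih5 k hk0 (by omega) hks hk1 hk2
  | case3 heap pos hcl =>
    intro he hp ht ha _hb
    exact ⟨hp, by omega, ht, fun x => List.Perm.refl _,
      fun k hk0 hklen hks hk1 hk2 => ha k hk0 hklen hks hk1 hk2⟩

theorem siftupA_spec (heap : List Int) (s : Nat) (hs : s < heap.length)
    (hh : ∀ k, 0 < k → k < heap.length → s + 1 ≤ (k - 1) / 2 →
        heap.getD ((k - 1) / 2) 0 ≤ heap.getD k 0) :
    (∀ k, 0 < k → k < heap.length → s ≤ (k - 1) / 2 →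
        (siftupA heap s).getD ((k - 1) / 2) 0 ≤ (siftupA heap s).getD k 0)
    ∧ (siftupA heap s).Perm heap ∧ (siftupA heap s).length = heap.length := by
  obtain ⟨l1, l2, l3, l4, l5⟩ := siftupLoopA_spec heap heap.length s s rfl hs (InTree_self s)
    (fun k hk0 hklen hks hk1 hk2 => hh k hk0 hklen (by omega))
    (fun hss => absurd hss (by omega))
  set r := siftupLoopA heap heap.length s with hr
  set x := heap.getD s 0 with hx
  set h2 := r.1.set r.2 x with hh2
  have hrlen : r.1.length = heap.length := siftupLoopA_length heap heap.length s
  have h2len : h2.length = heap.length := by simp [hh2, hrlen]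
  have hperm2 : h2.Perm heap := by
    have := l4 x
    rwa [hx, set_getD_self heap s] at this
  have heq : siftupA heap s = siftdownA h2 s r.2 := rfl
  obtain ⟨d1, d2⟩ := siftdownA_spec h2 s r.2 (by omega) l3
    (by
      intro k hk0 hklen hks hkne
      rw [h2len] at hklen
      by_cases hkpar : (k - 1) / 2 = r.2
      · exact absurd hklen (by omega)
      · rw [hh2, gset_ne _ _ (Ne.symm hkpar), gset_ne _ _ (Ne.symm hkne)]
        exact l5 k hk0 hklen hks hkne hkpar)
    (by omega)
  refine ⟨?_, ?_, ?_⟩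
  · intro k hk0 hklen hks
    rw [heq]
    exact d1 k hk0 (by omega) hks
  · rw [heq]; exact d2.trans hperm2
  · rw [heq, siftdownA_length, h2len]
def IsHeap (h : List Int) : Prop :=
  ∀ k, 0 < k → k < h.length → h.getD ((k - 1) / 2) 0 ≤ h.getD k 0

theorem heapify_aux : ∀ (i : Nat) (h : List Int), 2 * i ≤ h.length →
    (∀ k, 0 < k → k < h.length → i ≤ (k - 1) / 2 → h.getD ((k - 1) / 2) 0 ≤ h.getD k 0) →
    IsHeap ((List.range i).reverse.foldl (fun a j => siftupA a j) h)
    ∧ ((List.range i).reverse.foldl (fun a j => siftupA a j) h).Perm h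
    ∧ ((List.range i).reverse.foldl (fun a j => siftupA a j) h).length = h.length := by
  intro i
  induction i with
  | zero =>
    intro h _ ha
    refine ⟨?_, List.Perm.refl _, rfl⟩
    intro k hk0 hklen
    exact ha k hk0 hklen (by omega)
  | succ i ihi =>
    intro h hle ha
    have hstep : (List.range (i + 1)).reverse.foldl (fun a j => siftupA a j) h
        = (List.range i).reverse.foldl (fun a j => siftupA a j) (siftupA h i) := by
      rw [List.range_succ, List.reverse_append]
      rfl
    have hs : i < h.length := by omega
    obtain ⟨e1, e2, e3⟩ := siftupA_spec h i hs
      (fun k hk0 hklen hks => ha k hk0 hklen (by omega))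
    obtain ⟨f1, f2, f3⟩ := ihi (siftupA h i) (by omega)
      (fun k hk0 hklen hks => e1 k hk0 (by omega) hks)
    rw [hstep]
    exact ⟨f1, f2.trans e2, by omega⟩

theorem heapifyA_spec (h : List Int) :
    IsHeap (heapifyA h) ∧ (heapifyA h).Perm h ∧ (heapifyA h).length = h.length := by
  have := heapify_aux (h.length / 2) h (by omega)
    (fun k hk0 hklen hks => absurd hks (by omega))
  simpa [heapifyA] using this

theorem root_min (h : List Int) (hh : IsHeap h) : ∀ k, k < h.length → h.getD 0 0 ≤ h.getD k 0 := by
  intro k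
  induction k using Nat.strong_induction_on with
  | _ k ih =>
    intro hk
    rcases Nat.eq_zero_or_pos k with hk0 | hk0
    · subst hk0; exact le_refl _
    · exact le_trans (ih ((k - 1) / 2) (by omega) (by omega)) (hh k hk0 hk)

theorem root_min_mem (h : List Int) (hh : IsHeap h) : ∀ x ∈ h, h.getD 0 0 ≤ x := by
  intro x hx
  obtain ⟨k, hk, rfl⟩ := List.getElem_of_mem hx
  rw [← List.getD_eq_getElem h 0 hk]
  exact root_min h hh k hk

theorem heappopA_spec (h : List Int) (hne : h ≠ []) (hh : IsHeap h) :
    (heappopA h).1 = h.getD 0 0 ∧ ((heappopA h).1 :: (heappopA h).2).Perm h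
    ∧ IsHeap (heappopA h).2 := by
  by_cases hre : h.dropLast.isEmpty = true
  · have hlen1 : h.length = 1 := by
      have h1 := List.isEmpty_iff.mp hre
      have h2 : h.dropLast.length = h.length - 1 := by simp
      have h3 : 0 < h.length := List.length_pos_iff.mpr hne
      rw [h1] at h2; simp at h2; omega
    obtain ⟨a, ha⟩ := List.length_eq_one_iff.mp hlen1
    subst ha
    refine ⟨by simp [heappopA], by simp [heappopA], ?_⟩
    intro k hk0 hklen
    simp [heappopA] at hklen
  · have hrne : h.dropLast ≠ [] := by simpa [List.isEmpty_iff] using hre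
    have hlen2 : 2 ≤ h.length := by
      have h1 := List.length_pos_iff.mpr hrne
      have h2 : h.dropLast.length = h.length - 1 := by simp
      omega
    have hpop : heappopA h
        = (h.dropLast.getD 0 0, siftupA (h.dropLast.set 0 (h.getLast?.getD 0)) 0) := by
      simp only [heappopA, hre]
      rfl
    have hrlen : h.dropLast.length = h.length - 1 := by simp
    have hr0 : h.dropLast.getD 0 0 = h.getD 0 0 := by
      rw [List.getD_eq_getElem _ 0 (by omega), List.getD_eq_getElem _ 0 (by omega)]
      simp [List.getElem_dropLast]
    set lastelt := h.getLast?.getD 0 with hlast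
    set h0 := h.dropLast.set 0 lastelt with hh0
    have h0len : h0.length = h.length - 1 := by simp [hh0, hrlen]
    have hval : ∀ j, j ≠ 0 → j < h0.length → h0.getD j 0 = h.getD j 0 := by
      intro j hj hjl
      rw [hh0, gset_ne _ _ (Ne.symm hj)]
      rw [List.getD_eq_getElem _ 0 (by omega), List.getD_eq_getElem _ 0 (by omega)]
      simp [List.getElem_dropLast]
    obtain ⟨s1, s2, s3⟩ := siftupA_spec h0 0 (by omega)
      (by
        intro k hk0 hklen hks
        rw [hval k (by omega) hklen, hval ((k - 1) / 2) (by omega) (by omega)]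
        exact hh k hk0 (by omega))
    refine ⟨by rw [hpop]; exact hr0, ?_, ?_⟩
    · rw [hpop]
      show (h.dropLast.getD 0 0 :: siftupA h0 0).Perm h
      obtain ⟨r0, t, hrt⟩ := List.exists_cons_of_ne_nil hrne
      have hr0' : r0 = h.getD 0 0 := by rw [← hr0, hrt]; rfl
      have hh0' : h0 = lastelt :: t := by rw [hh0, hrt]; rfl
      have hlaste : lastelt = h.getLast hne := by
        rw [hlast, List.getLast?_eq_some_getLast hne]; rfl
      have hsplit : h = (r0 :: t) ++ [lastelt] := by
        rw [← hrt, hlaste]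
        exact (List.dropLast_append_getLast hne).symm
      have step1 : (h.dropLast.getD 0 0 :: siftupA h0 0).Perm (h.getD 0 0 :: h0) := by
        rw [hr0]
        exact (s2.trans (by rw [hh0])).cons _
      refine step1.trans ?_
      rw [hh0']
      have hswap : (lastelt :: t).Perm (t ++ [lastelt]) := by
        simpa using (List.perm_middle (a := lastelt) (l₁ := t) (l₂ := [])).symm
      refine (hswap.cons _).trans ?_
      rw [hsplit, hr0']
      simp
    · rw [hpop]
      show IsHeap (siftupA h0 0)
      intro k hk0 hklen
      exact s1 k hk0 (by omega) (by omega)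

theorem heappushA_spec (h : List Int) (x : Int) (hh : IsHeap h) :
    IsHeap (heappushA h x) ∧ (heappushA h x).Perm (x :: h) := by
  have happ : ∀ j, j < h.length → (h ++ [x]).getD j 0 = h.getD j 0 := by
    intro j hj
    rw [List.getD_eq_getElem _ 0 (by simp; omega), List.getD_eq_getElem _ 0 hj]
    exact List.getElem_append_left _
  obtain ⟨d1, d2⟩ := siftdownA_spec (h ++ [x]) 0 h.length (by simp) (InTree_zero _)
    (by
      intro k hk0 hklen hks hkne
      have hklt : k < h.length := by simp at hklen; omega
      rw [happ k hklt, happ ((k - 1) / 2) (by omega)]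
      exact hh k hk0 hklt)
    (by simp; omega)
  have hpush : heappushA h x = siftdownA (h ++ [x]) 0 h.length := rfl
  have hdl : (siftdownA (h ++ [x]) 0 h.length).length = (h ++ [x]).length :=
    siftdownA_length _ _ _
  constructor
  · rw [hpush]
    intro k hk0 hklen
    exact d1 k hk0 (by omega) (by omega)
  · rw [hpush]
    refine d2.trans ?_
    exact List.perm_middle.trans (by simp)

theorem min_getD (heap pool : List Int) (hne : heap ≠ []) (hh : IsHeap heap)
    (hp : heap.Perm pool) :
    (PySem.List.min? pool (fun y => y)).getD 0 = heap.getD 0 0 := by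
  have hpne : pool ≠ [] := by
    intro he; subst he; exact hne hp.eq_nil
  obtain ⟨m, hm⟩ : ∃ m, PySem.List.min? pool (fun y => y) = some m := by
    cases hq : PySem.List.min? pool (fun y => y) with
    | none => exact absurd ((PySem.List.min?_eq_none_iff pool _).mp hq) hpne
    | some m => exact ⟨m, rfl⟩
  rw [hm, Option.getD_some]
  have hroot_mem : heap.getD 0 0 ∈ heap := by
    rw [List.getD_eq_getElem heap 0 (List.length_pos_iff.mpr hne)]
    exact List.getElem_mem _
  refine le_antisymm ?_ ?_
  · exact PySem.List.min?_isMin hm _ (hp.mem_iff.mp hroot_mem)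
  · exact root_min_mem heap hh m (hp.symm.subset (PySem.List.min?_mem hm))
theorem loopA_step (heap : List Int) (K ans : Int) (h : 1 < heap.length) :
    loopA heap K ans = if (heappopA heap).1 ≥ K then ans
      else loopA (heappushA (heappopA (heappopA heap).2).2
          ((heappopA heap).1 + (heappopA (heappopA heap).2).1 * 2)) K (ans + 1) := by
  rw [loopA, dif_pos h]

theorem loopA_last (heap : List Int) (K ans : Int) (h : ¬ 1 < heap.length) :
    loopA heap K ans = if heap.getD 0 0 ≥ K then ans else -1 := by
  rw [loopA, dif_neg h]

theorem loopB_step (pool : List Int) (K ans : Int) (h : 1 < pool.length)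
    (first second : Int) (pool1 pool2 : List Int)
    (h1 : first = (PySem.List.min? pool (fun x => x)).getD 0)
    (h2 : pool1 = (PySem.List.remove? pool first).getD [])
    (h3 : second = (PySem.List.min? pool1 (fun x => x)).getD 0)
    (h4 : pool2 = (PySem.List.remove? pool1 second).getD []) :
    loopB pool K ans = if first ≥ K then ans
      else loopB (pool2 ++ [first + second * 2]) K (ans + 1) := by
  subst h1; subst h2; subst h3; subst h4
  rw [loopB, dif_pos h]

theorem loopB_last (pool : List Int) (K ans : Int) (h : ¬ 1 < pool.length) :
    loopB pool K ans = if pool.getD 0 0 ≥ K then ans else -1 := by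
  rw [loopB, dif_neg h]

theorem loop_eq (n : Nat) : ∀ (heap pool : List Int) (K ans : Int),
    heap.length = n → heap ≠ [] → IsHeap heap → heap.Perm pool →
    loopA heap K ans = loopB pool K ans := by
  induction n using Nat.strong_induction_on with
  | _ n ihn =>
    intro heap pool K ans hn hne hh hp
    have hplen : pool.length = heap.length := hp.length_eq.symm
    by_cases h1 : 1 < heap.length
    · -- one mixing round on each side
      obtain ⟨pA1, pA2, pA3⟩ := heappopA_spec heap hne hh
      have hlenp : (heappopA heap).2.length + 1 = heap.length := heappopA_length heap hne
      have hne1 : (heappopA heap).2 ≠ [] := by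
        intro he; rw [he] at hlenp; simp at hlenp; omega
      obtain ⟨qA1, qA2, qA3⟩ := heappopA_spec (heappopA heap).2 hne1 pA3
      have hlenq : (heappopA (heappopA heap).2).2.length + 1 = (heappopA heap).2.length :=
        heappopA_length _ hne1
      -- B-side values
      have hminp : (PySem.List.min? pool (fun x => x)).getD 0 = heap.getD 0 0 :=
        min_getD heap pool hne hh hp
      have hroot_mem : heap.getD 0 0 ∈ pool := by
        refine hp.mem_iff.mp ?_
        rw [List.getD_eq_getElem heap 0 (List.length_pos_iff.mpr hne)]
        exact List.getElem_mem _
      have h2 : pool.erase (heap.getD 0 0) = (PySem.List.remove? pool (heap.getD 0 0)).getD [] := by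
        rw [PySem.List.remove?_eq_some_erase pool _ hroot_mem, Option.getD_some]
      -- the remaining multisets after the first pop agree
      have hperm1 : (heappopA heap).2.Perm (pool.erase (heap.getD 0 0)) := by
        have step : ((heappopA heap).1 :: (heappopA heap).2).Perm
            (heap.getD 0 0 :: pool.erase (heap.getD 0 0)) :=
          pA2.trans (hp.trans (List.perm_cons_erase hroot_mem))
        rw [pA1] at step
        exact step.cons_inv
      have hmin1 : (PySem.List.min? (pool.erase (heap.getD 0 0)) (fun x => x)).getD 0
          = (heappopA heap).2.getD 0 0 :=
        min_getD _ _ hne1 pA3 hperm1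
      have hsec_mem : (heappopA heap).2.getD 0 0 ∈ pool.erase (heap.getD 0 0) := by
        refine hperm1.mem_iff.mp ?_
        rw [List.getD_eq_getElem _ 0 (List.length_pos_iff.mpr hne1)]
        exact List.getElem_mem _
      have h4 : (pool.erase (heap.getD 0 0)).erase ((heappopA heap).2.getD 0 0)
          = (PySem.List.remove? (pool.erase (heap.getD 0 0))
              ((heappopA heap).2.getD 0 0)).getD [] := by
        rw [PySem.List.remove?_eq_some_erase _ _ hsec_mem, Option.getD_some]
      rw [loopA_step heap K ans h1,
          loopB_step pool K ans (by omega) (heap.getD 0 0) ((heappopA heap).2.getD 0 0)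
            (pool.erase (heap.getD 0 0))
            ((pool.erase (heap.getD 0 0)).erase ((heappopA heap).2.getD 0 0))
            hminp.symm h2 hmin1.symm h4, pA1]
      by_cases hK : heap.getD 0 0 ≥ K
      · rw [if_pos hK, if_pos hK]
      · rw [if_neg hK, if_neg hK]
        -- the pushed values coincide
        rw [qA1]
        -- remaining multisets after the second pop agree
        have hperm2 : (heappopA (heappopA heap).2).2.Perm
            ((pool.erase (heap.getD 0 0)).erase ((heappopA heap).2.getD 0 0)) := by
          have step : ((heappopA (heappopA heap).2).1 :: (heappopA (heappopA heap).2).2).Perm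
              ((heappopA heap).2.getD 0 0 ::
                (pool.erase (heap.getD 0 0)).erase ((heappopA heap).2.getD 0 0)) :=
            qA2.trans (hperm1.trans (List.perm_cons_erase hsec_mem))
          rw [qA1] at step
          exact step.cons_inv
        set v := heap.getD 0 0 + (heappopA heap).2.getD 0 0 * 2 with hv
        obtain ⟨rH, rP⟩ := heappushA_spec (heappopA (heappopA heap).2).2 v qA3
        have hpushlen : (heappushA (heappopA (heappopA heap).2).2 v).length = heap.length - 1 := by
          rw [heappushA_length]; omega
        have hpushne : heappushA (heappopA (heappopA heap).2).2 v ≠ [] := by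
          intro he; rw [he] at hpushlen; simp at hpushlen; omega
      

        refine ihn (heap.length - 1) (by omega) _ _ K (ans + 1) hpushlen hpushne rH ?_
        refine rP.trans ?_
        refine (hperm2.cons v).trans ?_
        simpa using (List.perm_middle (a := v)
          (l₁ := (pool.erase (heap.getD 0 0)).erase ((heappopA heap).2.getD 0 0))
          (l₂ := [])).symm
    · -- a single food is left on both sides
      have hlen1 : heap.length = 1 := by
        have := List.length_pos_iff.mpr hne; omega
      obtain ⟨a, ha⟩ := List.length_eq_one_iff.mp hlen1
      subst ha
      have hpool : pool = [a] := List.perm_singleton.mp hp.symm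
      subst hpool
      rw [loopA_last _ _ _ (by simp), loopB_last _ _ _ (by simp)]

-- ===== VERDICT (by name: the statement is the Claim_ definition above) =====
theorem solution_spec : Claim_equal_solution := by
  unfold Claim_equal_solution
  intro scoville K _hdom hpre
  unfold Pre_solution at hpre
  unfold Spec_solution solution solution_alt
  obtain ⟨hH, hPerm, hLen⟩ := heapifyA_spec scoville
  have hne : heapifyA scoville ≠ [] := by
    intro he
    rw [he] at hLen
    simp at hLen
    exact hpre (List.length_eq_zero_iff.mp hLen.symm)
  exact loop_eq (heapifyA scoville).length (heapifyA scoville) scoville K 0 rfl hne hH hPerm
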